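-- pv_equiv track=rewrite | github.com/tomanAdrian/Projekt2 | src/parser/MikrotikParser.py | groupSplitLines
-- ===== SOURCE A (Python) =====
-- def groupSplitLines(input):
--     output = []
--     for lineIndex, inputLine in enumerate(input):
--         input[lineIndex] = inputLine.strip()
--     for lineIndex, inputLine in enumerate(input):
--         line = ''
--         if inputLine[0].isnumeric():
--             line += inputLine + ' '
--             for sameLine in input[lineIndex + 1:]:
--                 if sameLine[0].isnumeric():
--                     break
--                 line += sameLine + ' '
--             output.append(line)
--     return output
-- ===== SOURCE B (Python) =====
-- def groupSplitLines(input):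
--     for lineIndex, inputLine in enumerate(input):
--         input[lineIndex] = inputLine.strip()
--     output = []
--     current = None
--     for line in input:
--         if line[0].isnumeric():
--             if current is not None:
--                 output.append(current)
--             current = line + ' '
--         elif current is not None:
--             current += line + ' '
--     if current is not None:
--         output.append(current)
--     return output
-- ===== Notes on version B (the rewrite author's own statement) =====
-- stated objective: alternative
-- what changed: Replaces A's per-numeric-line forward scan over a sliced tail of the list with a single linear pass maintaining an optional running group accumulator (flush on each numeric line, append otherwise).
import Mathlib
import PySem

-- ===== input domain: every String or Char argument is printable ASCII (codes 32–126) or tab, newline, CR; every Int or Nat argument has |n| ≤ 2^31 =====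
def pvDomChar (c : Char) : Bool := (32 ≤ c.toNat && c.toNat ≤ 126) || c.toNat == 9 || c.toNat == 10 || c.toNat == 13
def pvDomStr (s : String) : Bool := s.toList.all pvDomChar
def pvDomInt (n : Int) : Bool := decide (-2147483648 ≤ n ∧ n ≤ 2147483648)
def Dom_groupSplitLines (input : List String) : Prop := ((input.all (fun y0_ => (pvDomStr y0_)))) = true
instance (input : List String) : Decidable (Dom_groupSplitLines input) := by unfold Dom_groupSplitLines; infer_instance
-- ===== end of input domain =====

-- B replaces A's per-group forward scan over the sliced tail with one linear pass keeping an
-- optional running group accumulator (objective: alternative decomposition, same return value).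
-- Both Pythons strip `input` in place (same mutation in A and B); the equivalence proved here is
-- about the return value.

-- ===== PORT A =====
-- `inputLine[0].isnumeric()`: on the printable-ASCII domain isnumeric = isdigit of the first
-- character; `false` on the empty string stands for the IndexError, excluded by Pre_ below.
def pvHeadNum (s : String) : Bool :=
  match s.toList with
  | [] => false
  | c :: _ => PySem.Chars.isdigit c

-- inner loop: `for sameLine in input[lineIndex + 1:]: break / line += sameLine + ' '`
def pvInnerA : String → List String → String
  | line, [] => line
  | line, sameLine :: rest =>
      if pvHeadNum sameLine then line else pvInnerA (line ++ sameLine ++ " ") rest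

-- outer loop over `enumerate(input)`: the slice `input[lineIndex+1:]` is the tail `rest`
def pvOuterA : List String → List String
  | [] => []
  | inputLine :: rest =>
      if pvHeadNum inputLine then pvInnerA ("" ++ inputLine ++ " ") rest :: pvOuterA rest
      else pvOuterA rest

def groupSplitLines (input : List String) : List String :=
  pvOuterA (input.map PySem.Str.strip)

-- ===== PORT B =====
def pvStepB (st : Option String × List String) (line : String) : Option String × List String :=
  if pvHeadNum line then (some (line ++ " "), st.2 ++ st.1.toList)
  else (st.1.map (fun cur => cur ++ line ++ " "), st.2)

def groupSplitLines_alt (input : List String) : List String :=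
  let st := (input.map PySem.Str.strip).foldl pvStepB (none, [])
  st.2 ++ st.1.toList

-- ===== PRECONDITION & SPEC =====
-- Pre_ excludes inputs where some line strips to the empty string: there `line[0]` raises
-- IndexError in A (and in B).
def Pre_groupSplitLines (input : List String) : Prop :=
  ∀ s ∈ input, (PySem.Str.strip s).toList ≠ []
instance (input : List String) : Decidable (Pre_groupSplitLines input) := by
  unfold Pre_groupSplitLines; infer_instance

def pvWitness_groupSplitLines : List String := ["1 a", "b c", "2x"]

def Spec_groupSplitLines (input : List String) (out : List String) : Prop := out = groupSplitLines_alt input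
instance (input : List String) (out : List String) : Decidable (Spec_groupSplitLines input out) := by unfold Spec_groupSplitLines; infer_instance

-- ===== CLAIM (what is proved, stated in full; the proofs are below) =====
def Claim_equal_groupSplitLines : Prop := ∀ (input : List String), Dom_groupSplitLines input → Pre_groupSplitLines input → Spec_groupSplitLines input (groupSplitLines input)

-- ===== LEMMAS AND PROOFS =====

-- the suffix of a group: the non-numeric lines before the next numeric one, space-joined
def pvSJoin : List String → String
  | [] => ""
  | l :: r => if pvHeadNum l then "" else (l ++ " ") ++ pvSJoin r

lemma pvInnerA_eq (ls : List String) : ∀ acc, pvInnerA acc ls = acc ++ pvSJoin ls := by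
  induction ls with
  | nil => intro acc; simp [pvInnerA, pvSJoin]
  | cons l r ih =>
      intro acc
      by_cases h : pvHeadNum l
      · simp [pvInnerA, pvSJoin, h]
      · simp [pvInnerA, pvSJoin, h, ih, String.append_assoc]

-- what B's state (current, out) denotes: the groups still to be emitted
def pvEmit (c : Option String) (ls : List String) : List String :=
  match c with
  | none => pvOuterA ls
  | some cur => (cur ++ pvSJoin ls) :: pvOuterA ls

lemma pvFoldB_eq (ls : List String) : ∀ (c : Option String) (out : List String),
    (ls.foldl pvStepB (c, out)).2 ++ (ls.foldl pvStepB (c, out)).1.toList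
      = out ++ pvEmit c ls := by
  induction ls with
  | nil =>
      intro c out
      cases c <;> simp [pvEmit, pvOuterA, pvSJoin]
  | cons l r ih =>
      intro c out
      by_cases h : pvHeadNum l
      · cases c <;>
          simp [List.foldl_cons, pvStepB, h, ih, pvEmit, pvOuterA, pvSJoin, pvInnerA_eq,
            String.append_assoc]
      · cases c <;>
          simp [List.foldl_cons, pvStepB, h, ih, pvEmit, pvOuterA, pvSJoin,
            String.append_assoc]

-- ===== VERDICT (by name: the statement is the Claim_ definition above) =====
theorem groupSplitLines_spec : Claim_equal_groupSplitLines := by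
  intro input _ _
  unfold Spec_groupSplitLines groupSplitLines groupSplitLines_alt
  simpa [pvEmit] using (pvFoldB_eq (input.map PySem.Str.strip) none []).symm
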